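-- pv_equiv track=rewrite | github.com/MimusTriurus/gs_rag_kb | chunking.py | split_md_into_blocks
-- ===== SOURCE A (Python) =====
-- def split_md_into_blocks(md_content):
--     blocks = []
--     current_block = []
--     in_code_block = False
--
--     for line in md_content.split('\n'):
--         if line.strip().startswith('```'):
--             in_code_block = not in_code_block
--         if not in_code_block and line.strip() == '':
--             if current_block:
--                 blocks.append('\n'.join(current_block))
--                 current_block = []
--         else:
--             current_block.append(line)
--     if current_block:
--         blocks.append('\n'.join(current_block))
--     return blocks
-- ===== SOURCE B (Python) =====
-- def split_md_into_blocks(md_content):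
--     # Two-phase decomposition: first flag separator lines (blank outside code
--     # fences), then group maximal runs of non-separator lines into blocks.
--     lines = md_content.split('\n')
--     seps = []
--     in_code = False
--     for line in lines:
--         if line.strip().startswith('```'):
--             in_code = not in_code
--         seps.append((not in_code) and line.strip() == '')
--     blocks = []
--     i, n = 0, len(lines)
--     while i < n:
--         if seps[i]:
--             i += 1
--             continue
--         j = i
--         while j < n and not seps[j]:
--             j += 1
--         blocks.append('\n'.join(lines[i:j]))
--         i = j
--     return blocks
-- ===== Notes on version B (the rewrite author's own statement) =====
-- stated objective: alternative
-- what changed: Single fold with blocks/current_block/in_code state replaced by a two-phase decomposition: one pass flags separator lines, then maximal runs of non-separator lines are grouped into blocks, so no trailing flush or current_block guards are needed.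
import Mathlib
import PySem

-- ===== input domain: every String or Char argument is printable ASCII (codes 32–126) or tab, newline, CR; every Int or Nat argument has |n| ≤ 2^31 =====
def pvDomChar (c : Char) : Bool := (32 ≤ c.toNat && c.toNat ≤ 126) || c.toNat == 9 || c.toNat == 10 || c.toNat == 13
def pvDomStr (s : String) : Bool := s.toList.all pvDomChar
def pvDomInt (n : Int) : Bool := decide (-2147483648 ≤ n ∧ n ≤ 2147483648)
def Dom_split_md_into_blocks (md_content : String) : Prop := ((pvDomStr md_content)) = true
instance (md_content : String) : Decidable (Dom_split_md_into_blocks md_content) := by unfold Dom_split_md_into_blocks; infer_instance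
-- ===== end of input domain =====

-- B replaces A's single fold carrying blocks/current_block/in_code by a two-phase
-- decomposition (flag separator lines, then group maximal non-separator runs); same cost.

-- ===== PORT A =====
-- one iteration of A's for-loop; state = (blocks, current_block, in_code_block)
def stepA (st : List String × List String × Bool) (line : String) :
    List String × List String × Bool :=
  let code := if PySem.Str.startswith (PySem.Str.strip line) "```" then !st.2.2 else st.2.2
  if !code && (PySem.Str.strip line == "") then
    if st.2.1 ≠ [] then (st.1 ++ [PySem.Str.join "\n" st.2.1], [], code)
    else (st.1, [], code)
  else (st.1, st.2.1 ++ [line], code)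

def split_md_into_blocks (md_content : String) : List String :=
  let st := ((PySem.Str.split? md_content "\n").getD []).foldl stepA ([], [], false)
  if st.2.1 ≠ [] then st.1 ++ [PySem.Str.join "\n" st.2.1] else st.1

-- ===== PORT B =====
-- phase 1 of B: append this line's separator flag; state = (flagged lines, in_code)
def flagStep (st : List (String × Bool) × Bool) (line : String) :
    List (String × Bool) × Bool :=
  let code := if PySem.Str.startswith (PySem.Str.strip line) "```" then !st.2 else st.2
  (st.1 ++ [(line, !code && (PySem.Str.strip line == ""))], code)

-- Source B's inner while loop: the maximal leading run of non-separator lines, and the rest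
def takeRun : List (String × Bool) → List String × List (String × Bool)
  | [] => ([], [])
  | (l, true) :: rest => ([], (l, true) :: rest)
  | (l, false) :: rest => let p := takeRun rest; (l :: p.1, p.2)

theorem takeRun_len : ∀ fl : List (String × Bool), (takeRun fl).2.length ≤ fl.length := by
  intro fl
  induction fl with
  | nil => simp [takeRun]
  | cons h t ih =>
      rcases h with ⟨l, b⟩
      cases b
      · simp [takeRun]; omega
      · simp [takeRun]

-- Source B's outer while loop: skip separators, emit each joined run
def groupBlocks : List (String × Bool) → List String
  | [] => []
  | (_, true) :: rest => groupBlocks rest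
  | (l, false) :: rest =>
      PySem.Str.join "\n" (l :: (takeRun rest).1) :: groupBlocks (takeRun rest).2
termination_by fl => fl.length
decreasing_by
  all_goals simp only [List.length_cons]
  · omega
  · have := takeRun_len rest
    omega

def split_md_into_blocks_alt (md_content : String) : List String :=
  groupBlocks (((PySem.Str.split? md_content "\n").getD []).foldl flagStep ([], false)).1

-- ===== PRECONDITION & SPEC =====
def Spec_split_md_into_blocks (md_content : String) (out : List String) : Prop := out = split_md_into_blocks_alt md_content
instance (md_content : String) (out : List String) : Decidable (Spec_split_md_into_blocks md_content out) := by unfold Spec_split_md_into_blocks; infer_instance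

-- ===== CLAIM (what is proved, stated in full; the proofs are below) =====
def Claim_equal_split_md_into_blocks : Prop := ∀ (md_content : String), Dom_split_md_into_blocks md_content → Spec_split_md_into_blocks md_content (split_md_into_blocks md_content)

-- ===== LEMMAS AND PROOFS =====

theorem groupBlocks_nil : groupBlocks [] = [] := by
  unfold groupBlocks
  rfl

theorem groupBlocks_sep (l : String) (fl : List (String × Bool)) :
    groupBlocks ((l, true) :: fl) = groupBlocks fl := by
  unfold groupBlocks
  rw [← groupBlocks.eq_def]

theorem groupBlocks_run (l : String) (fl : List (String × Bool)) :
    groupBlocks ((l, false) :: fl)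
      = PySem.Str.join "\n" (l :: (takeRun fl).1) :: groupBlocks (takeRun fl).2 := by
  unfold groupBlocks
  rw [← groupBlocks.eq_def]

-- the flagged-line list phase 1 produces, starting from fence state `code`
def flagsFrom (code : Bool) : List String → List (String × Bool)
  | [] => []
  | line :: rest =>
      let code' := if PySem.Str.startswith (PySem.Str.strip line) "```" then !code else code
      (line, !code' && (PySem.Str.strip line == "")) :: flagsFrom code' rest

theorem foldl_flagStep (lines : List String) :
    ∀ (acc : List (String × Bool)) (code : Bool),
      (lines.foldl flagStep (acc, code)).1 = acc ++ flagsFrom code lines := by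
  induction lines with
  | nil => intro acc code; simp [flagsFrom]
  | cons line rest ih =>
      intro acc code
      simp only [List.foldl, flagStep, flagsFrom]
      rw [ih]
      simp

-- what A will still produce given a pending current_block `cur` and remaining flagged lines
def cont (cur : List String) (fl : List (String × Bool)) : List String :=
  if cur = [] then groupBlocks fl
  else PySem.Str.join "\n" (cur ++ (takeRun fl).1) :: groupBlocks (takeRun fl).2

theorem cont_sep (cur : List String) (l : String) (fl : List (String × Bool)) :
    cont cur ((l, true) :: fl) =
      (if cur = [] then [] else [PySem.Str.join "\n" cur]) ++ cont [] fl := by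
  by_cases h : cur = [] <;> simp [cont, h, groupBlocks_sep, takeRun]

theorem cont_nonsep (cur : List String) (l : String) (fl : List (String × Bool)) :
    cont cur ((l, false) :: fl) = cont (cur ++ [l]) fl := by
  by_cases h : cur = [] <;> simp [cont, h, groupBlocks_run, takeRun]

-- A's loop plus its final flush, from an arbitrary state, equals blocks ++ cont cur (flags)
theorem main_inv (lines : List String) :
    ∀ (blocks cur : List String) (code : Bool),
      (let st := lines.foldl stepA (blocks, cur, code)
       if st.2.1 ≠ [] then st.1 ++ [PySem.Str.join "\n" st.2.1] else st.1)
        = blocks ++ cont cur (flagsFrom code lines) := by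
  induction lines with
  | nil =>
      intro blocks cur code
      by_cases h : cur = [] <;> simp [flagsFrom, cont, h, takeRun, groupBlocks_nil]
  | cons line rest ih =>
      intro blocks cur code
      simp only [List.foldl, stepA, flagsFrom]
      by_cases hf : (!(if PySem.Str.startswith (PySem.Str.strip line) "```" then !code else code)
          && (PySem.Str.strip line == "")) = true
      · by_cases hc : cur = []
        · simp only [hf, hc, if_pos, ne_eq, not_true_eq_false, ite_false]
          rw [ih, cont_sep]
          subst hc
          simp
        · simp only [hf, if_pos, if_pos (by exact hc : cur ≠ [])]
          rw [ih, cont_sep]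
          rw [if_neg hc, List.append_assoc]
      · simp only [hf, ite_false, Bool.false_eq_true]
        rw [ih, cont_nonsep]

-- ===== VERDICT (by name: the statement is the Claim_ definition above) =====
theorem split_md_into_blocks_spec : Claim_equal_split_md_into_blocks := by
  intro md _
  unfold Spec_split_md_into_blocks split_md_into_blocks split_md_into_blocks_alt
  rw [foldl_flagStep]
  have := main_inv ((PySem.Str.split? md "\n").getD []) [] [] false
  simpa [cont] using this
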